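-- pv_equiv track=rewrite | github.com/KierankThompson/AOC2024 | problem14.py | calculateCloseness
-- ===== SOURCE A (Python) =====
-- def calculateCloseness(robotArr):
--     score = 0
--     for x,y in robotArr:
--         if (x+1,y) in robotArr:
--             score += 1
--         if (x-1,y) in robotArr:
--             score += 1
--         if (x,y+1) in robotArr:
--             score += 1
--         if (x,y-1) in robotArr:
--             score += 1
--     return score
-- ===== SOURCE B (Python) =====
-- def calculateCloseness(robotArr):
--     counts = {}
--     for p in robotArr:
--         counts[p] = counts.get(p, 0) + 1
--     keys = list(counts)
--     score = 0
--     byRow = sorted(keys, key=lambda p: (p[1], p[0]))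
--     for a, b in zip(byRow, byRow[1:]):
--         if a[1] == b[1] and b[0] - a[0] == 1:
--             score += counts[a] + counts[b]
--     byCol = sorted(keys)
--     for a, b in zip(byCol, byCol[1:]):
--         if a[0] == b[0] and b[1] - a[1] == 1:
--             score += counts[a] + counts[b]
--     return score
-- ===== Notes on version B (the rewrite author's own statement) =====
-- stated objective: faster
-- what changed: B discovers adjacent pairs by sorting the distinct positions twice (row-major and column-major) and scanning consecutive entries, adding counts[a]+counts[b] for each adjacent sorted pair, instead of A's four membership scans of the whole list per element.
import Mathlib
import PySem

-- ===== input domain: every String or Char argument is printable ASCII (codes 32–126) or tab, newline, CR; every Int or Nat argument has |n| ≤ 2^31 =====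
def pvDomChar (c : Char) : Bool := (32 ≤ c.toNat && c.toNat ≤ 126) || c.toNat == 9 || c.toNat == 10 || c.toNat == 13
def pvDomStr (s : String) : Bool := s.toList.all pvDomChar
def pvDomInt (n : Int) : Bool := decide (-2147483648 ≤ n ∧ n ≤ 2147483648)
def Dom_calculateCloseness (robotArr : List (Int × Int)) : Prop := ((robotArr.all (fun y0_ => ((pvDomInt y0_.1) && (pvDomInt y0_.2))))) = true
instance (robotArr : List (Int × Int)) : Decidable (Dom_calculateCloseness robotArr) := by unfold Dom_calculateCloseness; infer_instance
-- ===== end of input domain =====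

-- B replaces A's four whole-list membership scans per element by a count dict plus two sorts of the
-- distinct positions (row-major and column-major): adjacent pairs are found by scanning consecutive
-- sorted entries, each contributing counts[a] + counts[b] (faster).

-- ===== PORT A =====
-- A: for each element of the list, test each of its four neighbours for membership in the list.
def calculateCloseness (robotArr : List (Int × Int)) : Int :=
  robotArr.foldl (fun score p =>
    let score := if (p.1 + 1, p.2) ∈ robotArr then score + 1 else score
    let score := if (p.1 - 1, p.2) ∈ robotArr then score + 1 else score
    let score := if (p.1, p.2 + 1) ∈ robotArr then score + 1 else score
    if (p.1, p.2 - 1) ∈ robotArr then score + 1 else score) 0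

-- ===== PORT B =====
-- B: count multiplicities, then sort the distinct positions twice ((y,x)-order and (x,y)-order) and
-- scan consecutive sorted pairs, adding counts[a] + counts[b] for each horizontally/vertically
-- adjacent consecutive pair.
def calculateCloseness_alt (robotArr : List (Int × Int)) : Int :=
  let counts : PySem.Dict (Int × Int) Int :=
    robotArr.foldl (fun d p => d.insert p (d.getD p 0 + 1)) PySem.Dict.empty
  let keys := counts.keys
  let score : Int := 0
  let byRow := PySem.List.sorted2 keys (fun p => p.2) (fun p => p.1)
  let score := (byRow.zip byRow.tail).foldl (fun sc ab =>
    if ab.1.2 == ab.2.2 && ab.2.1 - ab.1.1 == 1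
    then sc + (counts.getD ab.1 0 + counts.getD ab.2 0) else sc) score
  let byCol := PySem.List.sorted2 keys (fun p => p.1) (fun p => p.2)
  let score := (byCol.zip byCol.tail).foldl (fun sc ab =>
    if ab.1.1 == ab.2.1 && ab.2.2 - ab.1.2 == 1
    then sc + (counts.getD ab.1 0 + counts.getD ab.2 0) else sc) score
  score

-- ===== PRECONDITION & SPEC =====
def Spec_calculateCloseness (robotArr : List (Int × Int)) (out : Int) : Prop := out = calculateCloseness_alt robotArr
instance (robotArr : List (Int × Int)) (out : Int) : Decidable (Spec_calculateCloseness robotArr out) := by unfold Spec_calculateCloseness; infer_instance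

-- ===== CLAIM (what is proved, stated in full; the proofs are below) =====
def Claim_equal_calculateCloseness : Prop := ∀ (robotArr : List (Int × Int)), Dom_calculateCloseness robotArr → Spec_calculateCloseness robotArr (calculateCloseness robotArr)

-- ===== LEMMAS AND PROOFS =====

-- per-position neighbour score (depends on the list only through membership)
def nScore (l : List (Int × Int)) (p : Int × Int) : Int :=
  (if (p.1 + 1, p.2) ∈ l then 1 else 0)
  + (if (p.1 - 1, p.2) ∈ l then 1 else 0)
  + (if (p.1, p.2 + 1) ∈ l then 1 else 0)
  + (if (p.1, p.2 - 1) ∈ l then 1 else 0)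

-- the two neighbour shifts and the two strict sort orders B uses
def nextR (p : Int × Int) : Int × Int := (p.1 + 1, p.2)
def prevR (p : Int × Int) : Int × Int := (p.1 - 1, p.2)
def nextC (p : Int × Int) : Int × Int := (p.1, p.2 + 1)
def prevC (p : Int × Int) : Int × Int := (p.1, p.2 - 1)
def ltR (a b : Int × Int) : Prop := a.2 < b.2 ∨ (a.2 = b.2 ∧ a.1 < b.1)
def ltC (a b : Int × Int) : Prop := a.1 < b.1 ∨ (a.1 = b.1 ∧ a.2 < b.2)

-- sum over consecutive pairs of a list, taking c a + c b exactly when b is a's neighbour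
def pairSum (next : Int × Int → Int × Int) (c : Int × Int → Int) : List (Int × Int) → Int
  | a :: b :: t => (if b = next a then c a + c b else 0) + pairSum next c (b :: t)
  | _ => 0

-- ===== A-side characterisation =====

theorem calcA_eq_sum (l : List (Int × Int)) :
    calculateCloseness l = (l.map (nScore l)).sum := by
  unfold calculateCloseness
  have h : (fun (score : Int) (p : Int × Int) =>
      let score := if (p.1 + 1, p.2) ∈ l then score + 1 else score
      let score := if (p.1 - 1, p.2) ∈ l then score + 1 else score
      let score := if (p.1, p.2 + 1) ∈ l then score + 1 else score
      if (p.1, p.2 - 1) ∈ l then score + 1 else score)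
      = fun score p => score + nScore l p := by
    funext score p
    simp only [nScore]
    split_ifs <;> ring
  rw [h, PySem.List.foldl_add, zero_add]

theorem count_beq_inst (l : List (Int × Int)) (m : Int × Int) :
    @List.count (Int × Int) instBEqProd m l = @List.count (Int × Int) instBEqOfDecidableEq m l := by
  induction l with
  | nil => rfl
  | cons a t ih => simp [List.count_cons, ih]

-- A's plain element-sum rewritten as a count-weighted sum over the distinct positions
theorem sum_eq_weighted (l : List (Int × Int)) (g : (Int × Int) → Int) :
    (l.map g).sum = ((PySem.Set.ofList l).map (fun p => ((@List.count (Int × Int) instBEqProd p l : Nat) : Int) * g p)).sum := by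
  have h1 := Finset.sum_multiset_map_count (l : Multiset (Int × Int)) g
  have h2 := List.sum_toFinset (fun p => ((@List.count (Int × Int) instBEqProd p l : Nat) : Int) * g p) (PySem.Set.nodup_ofList (xs := l))
  have h3 : (PySem.Set.ofList l).toFinset = l.toFinset := by
    ext x; simp [List.mem_toFinset, PySem.Set.mem_ofList]
  have h4 : (l.map g).sum = ∑ m ∈ l.toFinset, (@List.count (Int × Int) instBEqOfDecidableEq m l : Int) * g m := by
    simpa using h1
  rw [h4, ← h2, h3]
  apply Finset.sum_congr rfl
  intro m hm
  rw [count_beq_inst]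

-- ===== generic insertion-sort order facts (PySem has no order lemma for sorted2) =====

theorem pairwise_insertBy (before : (Int × Int) → (Int × Int) → Bool)
    (hasym : ∀ a b, before a b = true → before b a = false)
    (htr : ∀ a b c, before a b = true → before b c = true → before a c = true)
    (x : Int × Int) (ys : List (Int × Int))
    (h : ys.Pairwise (fun a b => before b a = false)) :
    (PySem.List.insertBy before x ys).Pairwise (fun a b => before b a = false) := by
  induction ys with
  | nil => simp [PySem.List.insertBy]
  | cons y ys ih =>
    rw [List.pairwise_cons] at h
    have heq : PySem.List.insertBy before x (y :: ys)
        = if before x y then x :: y :: ys else y :: PySem.List.insertBy before x ys := by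
      simp [PySem.List.insertBy]
    rw [heq]
    by_cases hxy : before x y = true
    · simp only [hxy, if_true]
      refine List.Pairwise.cons ?_ (List.Pairwise.cons h.1 h.2)
      intro z hz
      rcases List.mem_cons.mp hz with rfl | hz'
      · exact hasym x z hxy
      · cases hzx : before z x with
        | false => rfl
        | true =>
          have := htr z x y hzx hxy
          rw [h.1 z hz'] at this
          exact absurd this (by simp)
    · have hxy' : before x y = false := by
        cases hb : before x y with
        | false => rfl
        | true => exact absurd hb hxy
      simp only [hxy', Bool.false_eq_true, if_false]
      refine List.Pairwise.cons ?_ (ih h.2)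
      intro z hz
      rcases (PySem.List.mem_insertBy before x z ys).mp hz with rfl | hz'
      · exact hxy'
      · exact h.1 z hz'

theorem pairwise_foldl_insertBy (before : (Int × Int) → (Int × Int) → Bool)
    (hasym : ∀ a b, before a b = true → before b a = false)
    (htr : ∀ a b c, before a b = true → before b c = true → before a c = true) :
    ∀ (xs acc : List (Int × Int)), acc.Pairwise (fun a b => before b a = false) →
      (xs.foldl (fun acc x => PySem.List.insertBy before x acc) acc).Pairwise
        (fun a b => before b a = false) := by
  intro xs
  induction xs with
  | nil => intro acc h; exact h
  | cons x xs ih =>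
    intro acc h
    exact ih _ (pairwise_insertBy before hasym htr x acc h)

-- sorted2 IS the insertBy fold (definitional)
theorem sorted2_eq_foldl (xs : List (Int × Int)) (k1 k2 : (Int × Int) → Int) :
    PySem.List.sorted2 xs k1 k2 false
      = xs.foldl (fun acc x => PySem.List.insertBy
          (fun a b => decide (k1 a < k1 b) || !decide (k1 b < k1 a) && decide (k2 a < k2 b)) x acc) [] := rfl

-- the sorted distinct keys form a strict chain in the corresponding lexicographic order
theorem sorted2_pairwise_strict (xs : List (Int × Int)) (k1 k2 : (Int × Int) → Int)
    (hstrict : ∀ a b : Int × Int,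
      ((fun a b => decide (k1 a < k1 b) || !decide (k1 b < k1 a) && decide (k2 a < k2 b)) b a = false)
        → a ≠ b → (k1 a < k1 b ∨ (k1 a = k1 b ∧ k2 a < k2 b)))
    (hnd : xs.Nodup)
    (lt : (Int × Int) → (Int × Int) → Prop)
    (hlt : ∀ a b, (k1 a < k1 b ∨ (k1 a = k1 b ∧ k2 a < k2 b)) → lt a b) :
    (PySem.List.sorted2 xs k1 k2 false).Pairwise lt := by
  set before := fun (a b : Int × Int) =>
    decide (k1 a < k1 b) || !decide (k1 b < k1 a) && decide (k2 a < k2 b) with hbdef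
  have hasym : ∀ a b, before a b = true → before b a = false := by
    intro a b hab
    by_contra hcontra
    have hba : before b a = true := by
      cases h : before b a
      · exact absurd h hcontra
      · rfl
    simp only [hbdef, Bool.or_eq_true, Bool.and_eq_true, Bool.not_eq_true', decide_eq_true_eq,
      decide_eq_false_iff_not] at hab hba
    omega
  have htr : ∀ a b c, before a b = true → before b c = true → before a c = true := by
    intro a b c hab hbc
    simp only [hbdef, Bool.or_eq_true, Bool.and_eq_true, Bool.not_eq_true', decide_eq_true_eq,
      decide_eq_false_iff_not] at hab hbc ⊢
    omega
  have hw : (PySem.List.sorted2 xs k1 k2 false).Pairwise (fun a b => before b a = false) := by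
    rw [sorted2_eq_foldl]
    exact pairwise_foldl_insertBy before hasym htr xs [] List.Pairwise.nil
  have hnd' : (PySem.List.sorted2 xs k1 k2 false).Nodup :=
    (PySem.List.sorted2_perm xs k1 k2 false).nodup_iff.mpr hnd
  have := hw.and hnd'
  exact this.imp (fun {a b} h => hlt a b (hstrict a b h.1 h.2))

-- ===== the consecutive-pair scan on a strict chain counts exactly the neighbour pairs =====

theorem pairSum_eq_sum (next : (Int × Int) → (Int × Int)) (c : (Int × Int) → Int)
    (lt : (Int × Int) → (Int × Int) → Prop)
    (hirr : ∀ a, ¬ lt a a)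
    (htr : ∀ a b d, lt a b → lt b d → lt a d)
    (hgap : ∀ a w, lt a w → lt w (next a) → False)
    (hnext : ∀ a, lt a (next a)) :
    ∀ l : List (Int × Int), l.Pairwise lt →
      pairSum next c l = (l.map (fun u => if next u ∈ l then c u + c (next u) else 0)).sum := by
  intro l
  induction l with
  | nil => intro _; simp [pairSum]
  | cons a t ih =>
    intro hpw
    rw [List.pairwise_cons] at hpw
    cases t with
    | nil =>
      have hna : next a ≠ a := by
        intro h
        have := hnext a
        rw [h] at this
        exact hirr a this
      simp [pairSum, hna]
    | cons b t' =>
      have ha : ∀ z ∈ b :: t', lt a z := hpw.1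
      have htl := hpw.2
      have hihs := ih htl
      -- tail memberships do not see the head a
      have htail : (b :: t').map (fun u => if next u ∈ a :: b :: t' then c u + c (next u) else 0)
          = (b :: t').map (fun u => if next u ∈ b :: t' then c u + c (next u) else 0) := by
        apply List.map_congr_left
        intro u hu
        have hne : next u ≠ a := by
          intro h
          have h2 := hnext u
          rw [h] at h2
          exact hirr a (htr a u a (ha u hu) h2)
        simp [List.mem_cons, hne]
      -- the head's neighbour is present iff it is the very next sorted element
      have hhead : ((next a ∈ a :: b :: t') ) ↔ b = next a := by
        constructor
        · intro hm
          rcases List.mem_cons.mp hm with h | hm'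
          · exfalso
            have h2 := hnext a
            rw [h] at h2
            exact hirr a h2
          rcases List.mem_cons.mp hm' with h | hm''
          · exact h.symm
          · exact absurd (hgap a b (ha b (by simp)) ((List.pairwise_cons.mp htl).1 _ hm''))
              (fun h => h)
        · intro h; simp [List.mem_cons, ← h]
      show (if b = next a then c a + c b else 0) + pairSum next c (b :: t') = _
      rw [List.map_cons, List.sum_cons, hihs, htail]
      congr 1
      by_cases hb : b = next a
      · rw [if_pos hb, if_pos (hhead.mpr hb), hb]
      · rw [if_neg hb, if_neg (fun hm => hb (hhead.mp hm))]

-- ===== the B-side fold over zipped consecutive pairs IS pairSum =====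

theorem foldl_zip_pairSum (cond : (Int × Int) → (Int × Int) → Bool)
    (next : (Int × Int) → (Int × Int)) (c : (Int × Int) → Int)
    (hc : ∀ a b, cond a b = true ↔ b = next a) :
    ∀ (l : List (Int × Int)) (s : Int),
      (l.zip l.tail).foldl (fun sc ab =>
        if cond ab.1 ab.2 then sc + (c ab.1 + c ab.2) else sc) s
      = s + pairSum next c l := by
  intro l
  induction l with
  | nil => intro s; simp [pairSum]
  | cons a t ih =>
    intro s
    cases t with
    | nil => simp [pairSum]
    | cons b t' =>
      show ((a, b) :: (b :: t').zip t').foldl _ s = _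
      have hzip : (b :: t').zip t' = (b :: t').zip (b :: t').tail := rfl
      have hps : pairSum next c (a :: b :: t')
          = (if b = next a then c a + c b else 0) + pairSum next c (b :: t') := rfl
      rw [List.foldl_cons, hzip, ih, hps]
      show (if cond a b = true then s + (c a + c b) else s) + pairSum next c (b :: t') = _
      by_cases hb : b = next a
      · rw [if_pos ((hc a b).mpr hb), if_pos hb]
        ring
      · have hf : cond a b = false := by
          cases hcb : cond a b with
          | false => rfl
          | true => exact absurd ((hc a b).mp hcb) hb
        rw [hf]
        simp only [Bool.false_eq_true, if_false, if_neg hb]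
        ring

-- ===== reindexing: summing c over right neighbours = summing c over points with a left neighbour =====

theorem sum_shift (S : List (Int × Int)) (hnd : S.Nodup)
    (n m : (Int × Int) → (Int × Int))
    (hmn : ∀ u, m (n u) = u) (hnm : ∀ u, n (m u) = u) (c : (Int × Int) → Int) :
    (S.map (fun u => if n u ∈ S then c (n u) else 0)).sum
      = (S.map (fun v => if m v ∈ S then c v else 0)).sum := by
  rw [← List.sum_toFinset _ hnd, ← List.sum_toFinset _ hnd]
  have hmemn : ∀ u : Int × Int, (n u ∈ S) ↔ (n u ∈ S.toFinset) := by
    intro u; simp [List.mem_toFinset]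
  have hmemm : ∀ u : Int × Int, (m u ∈ S) ↔ (m u ∈ S.toFinset) := by
    intro u; simp [List.mem_toFinset]
  calc ∑ u ∈ S.toFinset, (if n u ∈ S then c (n u) else 0)
      = ∑ u ∈ S.toFinset with n u ∈ S, c (n u) := (Finset.sum_filter _ _).symm
    _ = ∑ v ∈ S.toFinset with m v ∈ S, c v := by
        apply Finset.sum_nbij' n m
        · intro a hal
          rw [Finset.mem_filter] at hal ⊢
          refine ⟨(hmemn a).mp hal.2, ?_⟩
          rw [hmn a]
          simpa [List.mem_toFinset] using hal.1
        · intro a hal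
          rw [Finset.mem_filter] at hal ⊢
          refine ⟨(hmemm a).mp hal.2, ?_⟩
          rw [hnm a]
          simpa [List.mem_toFinset] using hal.1
        · intro a _; exact hmn a
        · intro a _; exact hnm a
        · intro a _; rfl
    _ = ∑ v ∈ S.toFinset, (if m v ∈ S then c v else 0) := Finset.sum_filter _ _

-- order facts for the two sort orders
theorem ltR_facts :
    (∀ a, ¬ ltR a a) ∧ (∀ a b d, ltR a b → ltR b d → ltR a d)
      ∧ (∀ a w, ltR a w → ltR w (nextR a) → False) ∧ (∀ a, ltR a (nextR a)) := by
  refine ⟨?_, ?_, ?_, ?_⟩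
  · intro a h
    have h' : a.2 < a.2 ∨ (a.2 = a.2 ∧ a.1 < a.1) := h
    omega
  · intro a b d hab hbd
    have hab' : a.2 < b.2 ∨ (a.2 = b.2 ∧ a.1 < b.1) := hab
    have hbd' : b.2 < d.2 ∨ (b.2 = d.2 ∧ b.1 < d.1) := hbd
    show a.2 < d.2 ∨ (a.2 = d.2 ∧ a.1 < d.1)
    omega
  · intro a w h1 h2
    have h1' : a.2 < w.2 ∨ (a.2 = w.2 ∧ a.1 < w.1) := h1
    have h2' : w.2 < a.2 ∨ (w.2 = a.2 ∧ w.1 < a.1 + 1) := h2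
    omega
  · intro a
    show a.2 < a.2 ∨ (a.2 = a.2 ∧ a.1 < a.1 + 1)
    omega

theorem ltC_facts :
    (∀ a, ¬ ltC a a) ∧ (∀ a b d, ltC a b → ltC b d → ltC a d)
      ∧ (∀ a w, ltC a w → ltC w (nextC a) → False) ∧ (∀ a, ltC a (nextC a)) := by
  refine ⟨?_, ?_, ?_, ?_⟩
  · intro a h
    have h' : a.1 < a.1 ∨ (a.1 = a.1 ∧ a.2 < a.2) := h
    omega
  · intro a b d hab hbd
    have hab' : a.1 < b.1 ∨ (a.1 = b.1 ∧ a.2 < b.2) := hab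
    have hbd' : b.1 < d.1 ∨ (b.1 = d.1 ∧ b.2 < d.2) := hbd
    show a.1 < d.1 ∨ (a.1 = d.1 ∧ a.2 < d.2)
    omega
  · intro a w h1 h2
    have h1' : a.1 < w.1 ∨ (a.1 = w.1 ∧ a.2 < w.2) := h1
    have h2' : w.1 < a.1 ∨ (w.1 = a.1 ∧ w.2 < a.2 + 1) := h2
    omega
  · intro a
    show a.1 < a.1 ∨ (a.1 = a.1 ∧ a.2 < a.2 + 1)
    omega

-- B computed as two neighbour-pair sums over the distinct positions
theorem calcB_eq (l : List (Int × Int)) :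
    calculateCloseness_alt l
      = ((PySem.Set.ofList l).map (fun u =>
            if nextR u ∈ PySem.Set.ofList l
            then (List.count u l : Int) + (List.count (nextR u) l : Int) else 0)).sum
        + ((PySem.Set.ofList l).map (fun u =>
            if nextC u ∈ PySem.Set.ofList l
            then (List.count u l : Int) + (List.count (nextC u) l : Int) else 0)).sum := by
  have hndS : (PySem.Set.ofList l).Nodup := PySem.Set.nodup_ofList l
  -- condition ↔ neighbour equalities for the two scans
  have hc1 : ∀ a b : Int × Int, ((a.2 == b.2 && b.1 - a.1 == 1) = true) ↔ b = nextR a := by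
    intro a b
    simp [nextR, Prod.ext_iff]
    omega
  have hc2 : ∀ a b : Int × Int, ((a.1 == b.1 && b.2 - a.2 == 1) = true) ↔ b = nextC a := by
    intro a b
    simp [nextC, Prod.ext_iff]
    omega
  -- the two sorted key lists are strict chains
  have hpwR : (PySem.List.sorted2 (PySem.Set.ofList l) (fun p => p.2) (fun p => p.1) false).Pairwise ltR := by
    apply sorted2_pairwise_strict (PySem.Set.ofList l) (fun p => p.2) (fun p => p.1) ?_ hndS ltR
      (fun a b h => h)
    intro a b h hne
    replace h : (decide (b.2 < a.2) || !decide (a.2 < b.2) && decide (b.1 < a.1)) = false := h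
    simp at h
    rw [Ne, Prod.ext_iff] at hne
    show a.2 < b.2 ∨ (a.2 = b.2 ∧ a.1 < b.1)
    omega
  have hpwC : (PySem.List.sorted2 (PySem.Set.ofList l) (fun p => p.1) (fun p => p.2) false).Pairwise ltC := by
    apply sorted2_pairwise_strict (PySem.Set.ofList l) (fun p => p.1) (fun p => p.2) ?_ hndS ltC
      (fun a b h => h)
    intro a b h hne
    replace h : (decide (b.1 < a.1) || !decide (a.1 < b.1) && decide (b.2 < a.2)) = false := h
    simp at h
    rw [Ne, Prod.ext_iff] at hne
    show a.1 < b.1 ∨ (a.1 = b.1 ∧ a.2 < b.2)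
    omega
  have hpermR := PySem.List.sorted2_perm (PySem.Set.ofList l) (fun p => p.2) (fun p => p.1) false
  have hpermC := PySem.List.sorted2_perm (PySem.Set.ofList l) (fun p => p.1) (fun p => p.2) false
  have hmemR : ∀ x : Int × Int,
      (x ∈ PySem.List.sorted2 (PySem.Set.ofList l) (fun p => p.2) (fun p => p.1) false)
        = (x ∈ PySem.Set.ofList l) := fun x => propext hpermR.mem_iff
  have hmemC : ∀ x : Int × Int,
      (x ∈ PySem.List.sorted2 (PySem.Set.ofList l) (fun p => p.1) (fun p => p.2) false)
        = (x ∈ PySem.Set.ofList l) := fun x => propext hpermC.mem_iff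
  unfold calculateCloseness_alt
  simp only [PySem.Dict.foldl_insert_getD_add_one_eq_counter, PySem.Dict.keys_counter,
    PySem.Dict.getD_counter]
  rw [foldl_zip_pairSum _ nextR (fun u => (List.count u l : Int)) hc1,
      foldl_zip_pairSum _ nextC (fun u => (List.count u l : Int)) hc2]
  rw [pairSum_eq_sum nextR (fun u => (List.count u l : Int)) ltR
        ltR_facts.1 ltR_facts.2.1 ltR_facts.2.2.1 ltR_facts.2.2.2 _ hpwR,
      pairSum_eq_sum nextC (fun u => (List.count u l : Int)) ltC
        ltC_facts.1 ltC_facts.2.1 ltC_facts.2.2.1 ltC_facts.2.2.2 _ hpwC]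
  simp only [hmemR, hmemC]
  rw [List.Perm.sum_eq (hpermR.map _), List.Perm.sum_eq (hpermC.map _)]
  ring

-- A's count-weighted sum equals B's two neighbour-pair sums
theorem main_sum_eq (l : List (Int × Int)) :
    ((PySem.Set.ofList l).map (fun p => ((@List.count (Int × Int) instBEqProd p l : Nat) : Int) * nScore l p)).sum
      = ((PySem.Set.ofList l).map (fun u =>
            if nextR u ∈ PySem.Set.ofList l
            then (List.count u l : Int) + (List.count (nextR u) l : Int) else 0)).sum
        + ((PySem.Set.ofList l).map (fun u =>
            if nextC u ∈ PySem.Set.ofList l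
            then (List.count u l : Int) + (List.count (nextC u) l : Int) else 0)).sum := by
  have hndS : (PySem.Set.ofList l).Nodup := PySem.Set.nodup_ofList l
  have hmemS : ∀ x : Int × Int, (x ∈ l) = (x ∈ PySem.Set.ofList l) :=
    fun x => (propext (PySem.Set.mem_ofList l x)).symm
  -- expand A's weight into four indicator terms
  have hA : (fun p => ((List.count p l : Nat) : Int) * nScore l p)
      = fun u => (if nextR u ∈ PySem.Set.ofList l then (List.count u l : Int) else 0)
          + ((if prevR u ∈ PySem.Set.ofList l then (List.count u l : Int) else 0)
          + ((if nextC u ∈ PySem.Set.ofList l then (List.count u l : Int) else 0)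
          + (if prevC u ∈ PySem.Set.ofList l then (List.count u l : Int) else 0))) := by
    funext u
    simp only [nScore, nextR, prevR, nextC, prevC, hmemS]
    split_ifs <;> ring
  -- split each B summand into its two indicator terms
  have hBR : (fun u => if nextR u ∈ PySem.Set.ofList l
        then (List.count u l : Int) + (List.count (nextR u) l : Int) else 0)
      = fun u => (if nextR u ∈ PySem.Set.ofList l then (List.count u l : Int) else 0)
          + (if nextR u ∈ PySem.Set.ofList l then (List.count (nextR u) l : Int) else 0) := by
    funext u; split_ifs <;> ring
  have hBC : (fun u => if nextC u ∈ PySem.Set.ofList l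
        then (List.count u l : Int) + (List.count (nextC u) l : Int) else 0)
      = fun u => (if nextC u ∈ PySem.Set.ofList l then (List.count u l : Int) else 0)
          + (if nextC u ∈ PySem.Set.ofList l then (List.count (nextC u) l : Int) else 0) := by
    funext u; split_ifs <;> ring
  have hshiftR := sum_shift (PySem.Set.ofList l) hndS nextR prevR
    (by intro u; simp [nextR, prevR, Prod.ext_iff]; try omega)
    (by intro u; simp [nextR, prevR, Prod.ext_iff]; try omega)
    (fun u => (List.count u l : Int))
  have hshiftC := sum_shift (PySem.Set.ofList l) hndS nextC prevC
    (by intro u; simp [nextC, prevC, Prod.ext_iff]; try omega)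
    (by intro u; simp [nextC, prevC, Prod.ext_iff]; try omega)
    (fun u => (List.count u l : Int))
  rw [hA, hBR, hBC, PySem.List.sum_map_add_int, PySem.List.sum_map_add_int,
    PySem.List.sum_map_add_int, PySem.List.sum_map_add_int, PySem.List.sum_map_add_int,
    hshiftR, hshiftC]
  ring

-- ===== VERDICT (by name: the statement is the Claim_ definition above) =====
theorem calculateCloseness_spec : Claim_equal_calculateCloseness := by
  intro l _
  unfold Spec_calculateCloseness
  rw [calcA_eq_sum, sum_eq_weighted, calcB_eq, main_sum_eq]
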